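-- pv_equiv track=rewrite | github.com/LorenzLanghammer/gmailCreator | scripts/macro_gen.py | joinEvents
-- ===== SOURCE A (Python) =====
-- def joinEvents(eventsList):
--     result = []
--     for i, events in enumerate(eventsList):
--         for j, event in enumerate(events):
--             if (i != len(eventsList) - 1 and j == len(eventsList[i]) - 1):
--                 result.append(event + ",")
--             else:
--                 result.append(event)
--     return result
-- ===== SOURCE B (Python) =====
-- def joinEvents(eventsList):
--     result = []
--     last = len(eventsList) - 1
--     for i, events in enumerate(eventsList):
--         if i != last and events:
--             result.extend(events[:-1])
--             result.append(events[-1] + ",")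
--         else:
--             result.extend(events)
--     return result
-- ===== Notes on version B (the rewrite author's own statement) =====
-- stated objective: simpler
-- what changed: Replaces the inner per-element loop with its j==len-1 boundary test by a per-sublist batched step: extend with events[:-1] and append the last element with a comma (plain extend for the final or an empty sublist); the batched C-level extend is also a constant factor faster.
import Mathlib
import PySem

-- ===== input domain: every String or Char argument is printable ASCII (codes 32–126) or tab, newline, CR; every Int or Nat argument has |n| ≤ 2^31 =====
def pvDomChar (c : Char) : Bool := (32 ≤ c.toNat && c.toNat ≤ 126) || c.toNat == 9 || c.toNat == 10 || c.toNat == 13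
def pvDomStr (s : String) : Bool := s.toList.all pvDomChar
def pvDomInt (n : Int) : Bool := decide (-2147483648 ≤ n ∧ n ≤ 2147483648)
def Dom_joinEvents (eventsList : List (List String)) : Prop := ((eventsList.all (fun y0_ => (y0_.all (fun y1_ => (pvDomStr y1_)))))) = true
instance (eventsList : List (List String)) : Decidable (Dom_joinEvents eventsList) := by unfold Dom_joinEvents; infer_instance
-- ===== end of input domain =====

-- B flattens with one batched step per sublist (slice + one append) instead of A's inner
-- per-element loop with a j == len-1 boundary test; same return value, objective: simpler.

-- ===== PORT A =====
-- literal port: nested loops over enumerate; note eventsList[i] is events (no mutation occurs)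
def joinEvents (eventsList : List (List String)) : List String :=
  (PySem.List.enumerate eventsList).foldl
    (fun result ie =>
      (PySem.List.enumerate ie.2).foldl
        (fun result je =>
          if ie.1 ≠ (eventsList.length : Int) - 1 ∧ je.1 = (ie.2.length : Int) - 1 then
            result ++ [je.2 ++ ","]
          else
            result ++ [je.2])
        result)
    []

-- ===== PORT B =====
-- port of Source B: events[:-1] is PySem.List.slice … (some (-1)); events[-1] is PySem.List.pyGetD
-- (the branch guard events ≠ [] makes the default unreachable, as in Python)
def joinEvents_alt (eventsList : List (List String)) : List String :=
  let last : Int := (eventsList.length : Int) - 1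
  (PySem.List.enumerate eventsList).foldl
    (fun result ie =>
      if ie.1 ≠ last ∧ ie.2 ≠ [] then
        result ++ PySem.List.slice ie.2 none (some (-1)) ++ [PySem.List.pyGetD ie.2 (-1) "" ++ ","]
      else
        result ++ ie.2)
    []

-- ===== PRECONDITION & SPEC =====
def Spec_joinEvents (eventsList : List (List String)) (out : List String) : Prop := out = joinEvents_alt eventsList
instance (eventsList : List (List String)) (out : List String) : Decidable (Spec_joinEvents eventsList out) := by unfold Spec_joinEvents; infer_instance

-- ===== CLAIM (what is proved, stated in full; the proofs are below) =====
def Claim_equal_joinEvents : Prop := ∀ (eventsList : List (List String)), Dom_joinEvents eventsList → Spec_joinEvents eventsList (joinEvents eventsList)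

-- ===== LEMMAS AND PROOFS =====

-- a fold that appends the second component of each pair just appends the mapped list
theorem foldl_append_snd {α β : Type} (ps : List (α × β)) (r : List β) :
    ps.foldl (fun r p => r ++ [p.2]) r = r ++ ps.map Prod.snd := by
  induction ps generalizing r with
  | nil => simp
  | cons p ps ih => simp [List.foldl_cons, ih]

-- A's inner loop over one sublist equals B's batched step, for any accumulator
theorem inner_eq (i L : Int) (events : List String) (r : List String) :
    (PySem.List.enumerate events).foldl
      (fun result je =>
        if i ≠ L ∧ je.1 = (events.length : Int) - 1 then result ++ [je.2 ++ ","]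
        else result ++ [je.2]) r
    = if i ≠ L ∧ events ≠ [] then
        r ++ PySem.List.slice events none (some (-1)) ++ [PySem.List.pyGetD events (-1) "" ++ ","]
      else r ++ events := by
  by_cases hi : i = L
  · -- condition's first conjunct is false everywhere: plain flatten
    have h1 : (PySem.List.enumerate events).foldl
        (fun result je =>
          if i ≠ L ∧ je.1 = (events.length : Int) - 1 then result ++ [je.2 ++ ","]
          else result ++ [je.2]) r
        = (PySem.List.enumerate events).foldl (fun r p => r ++ [p.2]) r := by
      apply PySem.List.foldl_congr_mem
      intro acc x _
      simp [hi]
    rw [h1, foldl_append_snd, PySem.List.map_snd_enumerate]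
    simp [hi]
  · rcases List.eq_nil_or_concat events with hnil | ⟨init, x, hx⟩
    · subst hnil; simp [PySem.List.enumerate]
    · subst hx
      simp only [List.concat_eq_append]
      rw [PySem.List.enumerate_append, List.foldl_append]
      have hlen : ((init ++ [x]).length : Int) - 1 = (init.length : Int) := by
        simp
      have h1 : (PySem.List.enumerate init).foldl
          (fun result je =>
            if i ≠ L ∧ je.1 = ((init ++ [x]).length : Int) - 1 then result ++ [je.2 ++ ","]
            else result ++ [je.2]) r
          = (PySem.List.enumerate init).foldl (fun r p => r ++ [p.2]) r := by
        apply PySem.List.foldl_congr_mem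
        intro acc p hp
        rw [PySem.List.mem_enumerate_iff] at hp
        obtain ⟨k, hk, rfl⟩ := hp
        simp
        intro _
        omega
      rw [h1, foldl_append_snd, PySem.List.map_snd_enumerate]
      simp only [PySem.List.enumerate, List.foldl_cons, List.foldl_nil]
      rw [hlen]
      have hx1 : PySem.List.pyGetD (init ++ [x]) (-1) "" = x :=
        PySem.List.pyGetD_neg_one_append_singleton ..
      have hx2 : PySem.List.slice (init ++ [x]) none (some (-1)) = init := by
        rw [PySem.List.slice_to_neg_one]; simp
      simp [hi, hx1, hx2]

-- ===== VERDICT (by name: the statement is the Claim_ definition above) =====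
theorem joinEvents_spec : Claim_equal_joinEvents := by
  intro eventsList _
  unfold Spec_joinEvents joinEvents joinEvents_alt
  apply PySem.List.foldl_congr_mem
  intro acc ie _
  exact inner_eq ie.1 ((eventsList.length : Int) - 1) ie.2 acc
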